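-- pv_equiv track=rewrite | github.com/Eake123/WallstreetBetParse | RedditParse.py | tickertoDic
-- ===== SOURCE A (Python) =====
-- def tickertoDic(ticker,duplicate):
--     newList = [x for x in duplicate if x in ticker]
--     tickerDic = {}
--     for i in newList:
--         if(tickerDic.get(i) == None):
--             tickerDic[i] = 1
--         else:
--             tickerDic[i] += 1
--     return tickerDic
-- ===== SOURCE B (Python) =====
-- def tickertoDic(ticker, duplicate):
--     # Collect the distinct ticker elements of duplicate in first-appearance
--     # order, then build the dict with one whole-list count per key.
--     keys = []
--     for x in duplicate:
--         if x in ticker and x not in keys: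
--             keys.append(x)
--     return {k: duplicate.count(k) for k in keys}
-- ===== Notes on version B (the rewrite author's own statement) =====
-- stated objective: alternative
-- what changed: A filters duplicate by ticker membership and counts the filtered list incrementally into a dict; B never maintains running counts: it collects the distinct ticker keys in first-appearance order and then builds the dict with one duplicate.count(k) scan per distinct key.
import Mathlib
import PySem

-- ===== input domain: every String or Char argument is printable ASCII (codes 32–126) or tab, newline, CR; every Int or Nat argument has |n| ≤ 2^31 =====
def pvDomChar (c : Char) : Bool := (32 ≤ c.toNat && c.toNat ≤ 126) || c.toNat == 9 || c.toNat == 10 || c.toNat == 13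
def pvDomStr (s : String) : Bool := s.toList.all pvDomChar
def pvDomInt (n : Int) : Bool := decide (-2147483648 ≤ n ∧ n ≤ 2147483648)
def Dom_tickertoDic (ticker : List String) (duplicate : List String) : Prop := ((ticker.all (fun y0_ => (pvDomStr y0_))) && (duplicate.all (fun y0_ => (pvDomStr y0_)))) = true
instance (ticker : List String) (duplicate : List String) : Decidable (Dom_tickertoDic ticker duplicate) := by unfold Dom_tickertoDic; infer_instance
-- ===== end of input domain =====

-- B returns the same dict but by a different route: distinct kept keys first, then
-- one whole-list count per key; A maintains running counts over the filtered list.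

-- ===== PORT A =====
def tickertoDic (ticker : List String) (duplicate : List String) : List (String × Int) :=
  let newList := duplicate.filter (fun x => ticker.contains x)
  let tickerDic := newList.foldl
    (fun d i => if d.get? i == none then d.insert i 1 else d.insert i (d.getD i 0 + 1))
    PySem.Dict.empty
  tickerDic.items

-- ===== PORT B =====
def tickertoDic_alt (ticker : List String) (duplicate : List String) : List (String × Int) :=
  let keys := duplicate.foldl
    (fun ks x => if ticker.contains x && !ks.contains x then ks ++ [x] else ks) []
  let result := keys.foldl
    (fun d k => d.insert k (PySem.List.count duplicate k : Int)) PySem.Dict.empty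
  result.items

-- ===== PRECONDITION & SPEC =====
def Spec_tickertoDic (ticker : List String) (duplicate : List String) (out : List (String × Int)) : Prop := out = tickertoDic_alt ticker duplicate
instance (ticker : List String) (duplicate : List String) (out : List (String × Int)) : Decidable (Spec_tickertoDic ticker duplicate out) := by unfold Spec_tickertoDic; infer_instance

-- ===== CLAIM (what is proved, stated in full; the proofs are below) =====
def Claim_equal_tickertoDic : Prop := ∀ (ticker : List String) (duplicate : List String), Dom_tickertoDic ticker duplicate → Spec_tickertoDic ticker duplicate (tickertoDic ticker duplicate)

-- ===== LEMMAS AND PROOFS =====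

-- A's loop body is extensionally 'insert i (getD i 0 + 1)'.
lemma bodyA_eq :
    (fun (d : PySem.Dict String Int) i => if d.get? i == none then d.insert i 1 else d.insert i (d.getD i 0 + 1))
    = (fun d i => d.insert i (d.getD i 0 + 1)) := by
  funext d i
  by_cases h : d.get? i = none
  · simp [h, PySem.Dict.getD_of_get?_eq_none d 0 h]
  · simp [h]

-- One step of B's key-collecting loop.
lemma step_eq (ticker : List String) (s : PySem.Set String) (x : String) :
    (if (ticker.contains x && !List.contains s x) = true then s ++ [x] else s)
      = if ticker.contains x then PySem.Set.add s x else s := by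
  by_cases ht : x ∈ ticker <;> by_cases hc : x ∈ s <;>
    simp [PySem.Set.add, PySem.Set.contains, ht, hc]

-- B's key-collecting loop is the Set.add fold over the filtered list.
lemma keys_eq_ofList_filter (ticker : List String) :
    ∀ (xs : List String) (s : PySem.Set String),
      xs.foldl (fun ks x => if ticker.contains x && !ks.contains x then ks ++ [x] else ks) s
        = (xs.filter (fun x => ticker.contains x)).foldl PySem.Set.add s := by
  intro xs
  induction xs with
  | nil => intro s; rfl
  | cons x xs ih =>
    intro s
    rw [List.foldl_cons, List.filter_cons, step_eq]
    by_cases ht : ticker.contains x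
    · rw [if_pos ht, if_pos ht, List.foldl_cons]; exact ih _
    · rw [if_neg ht, if_neg ht]; exact ih _

-- B's dict-building loop over the distinct keys, as a map.
lemma items_B (duplicate : List String) (keys : List String) (hnd : keys.Nodup) :
    (keys.foldl (fun d k => d.insert k (PySem.List.count duplicate k : Int)) PySem.Dict.empty).items
      = keys.map (fun k => (k, (PySem.List.count duplicate k : Int))) := by
  have h := PySem.Dict.items_foldl_insert_fresh keys (fun a => a)
      (fun a => (PySem.List.count duplicate a : Int)) PySem.Dict.empty
      (fun a _ => by simp) (by simpa using hnd)
  simpa using h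

-- ===== VERDICT (by name: the statement is the Claim_ definition above) =====
theorem tickertoDic_spec : Claim_equal_tickertoDic := by
  intro ticker duplicate _
  show tickertoDic ticker duplicate = tickertoDic_alt ticker duplicate
  unfold tickertoDic tickertoDic_alt
  rw [bodyA_eq]
  dsimp only
  rw [PySem.Dict.foldl_insert_getD_add_one_eq_counter, PySem.Dict.items_counter]
  rw [keys_eq_ofList_filter]
  rw [← PySem.Set.ofList_eq_foldl]
  rw [items_B duplicate _ (PySem.Set.nodup_ofList (duplicate.filter (fun x => ticker.contains x)))]
  apply List.map_congr_left
  intro k hk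
  have hPk : k ∈ ticker := by
    have := (PySem.Set.mem_ofList _ k).1 hk
    simpa using (List.mem_filter.1 this).2
  have hcnt : List.count k (List.filter (fun x => decide (x ∈ ticker)) duplicate) = List.count k duplicate :=
    List.count_filter (by simpa using hPk)
  simp [PySem.List.count_eq, hcnt]
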